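-- pv_equiv track=rewrite | github.com/jingfee/advent-of-code-2024 | day7.py | check_equation
-- ===== SOURCE A (Python) =====
-- def check_equation(result, numbers, concat):
--     queue = [(numbers[0], 0)]
--     results = []
--     while len(queue) > 0:
--         curr = queue.pop()
--         if curr[1] == len(numbers) - 1:
--             results.append(curr[0])
--             continue;
--
--         queue.append((curr[0] * numbers[curr[1]+1], curr[1] + 1))
--         queue.append((curr[0] + numbers[curr[1]+1], curr[1] + 1))
--         if concat:
--            queue.append((int(str(curr[0]) + str(numbers[curr[1]+1])), curr[1] + 1))
--
--     if result in results:
--         return True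
--     else:
--         return False
-- ===== SOURCE B (Python) =====
-- def check_equation(result, numbers, concat):
--     # Depth-first boolean recursion with short-circuit: stop at the first
--     # operator sequence that hits the target (A enumerates every leaf value
--     # into a list first and tests membership afterwards).
--     def reach(acc, rest):
--         if not rest:
--             return acc == result
--         n = rest[0]
--         tail = rest[1:]
--         return (reach(acc + n, tail)
--                 or reach(acc * n, tail)
--                 or (concat and reach(int(str(acc) + str(n)), tail)))
--     return reach(numbers[0], numbers[1:])
-- ===== Notes on version B (the rewrite author's own statement) =====
-- stated objective: alternative
-- what changed: A runs an explicit LIFO queue that enumerates every leaf value into a results list and tests membership at the end; B is a short-circuiting boolean recursion over the suffix of numbers that returns at the first operator sequence reaching the target, keeping no queue or results list.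
import Mathlib
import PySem

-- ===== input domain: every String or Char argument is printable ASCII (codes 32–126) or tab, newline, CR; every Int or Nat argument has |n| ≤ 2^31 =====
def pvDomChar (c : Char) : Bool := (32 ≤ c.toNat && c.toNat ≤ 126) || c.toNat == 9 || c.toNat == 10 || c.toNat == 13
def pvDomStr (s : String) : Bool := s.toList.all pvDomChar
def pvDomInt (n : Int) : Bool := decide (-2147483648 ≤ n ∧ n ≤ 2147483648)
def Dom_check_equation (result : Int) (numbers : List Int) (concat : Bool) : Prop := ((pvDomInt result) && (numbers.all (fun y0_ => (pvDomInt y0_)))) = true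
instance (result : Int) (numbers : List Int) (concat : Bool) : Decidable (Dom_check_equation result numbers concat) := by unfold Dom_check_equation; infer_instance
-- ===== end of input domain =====

-- B replaces A's explicit queue + full results list by a short-circuiting boolean
-- recursion over the suffix of numbers (objective: alternative decomposition).


-- ===== PORT A =====
-- the 'while len(queue) > 0' loop; queue head = Python's stack top (append/pop at the end).
-- fuel is a totality guard only: 4^(len+1) strictly dominates the running weight of the
-- queue (checkLoop_spec below shows the fuel-exhausted branch is never reached).
def checkLoop (numbers : List Int) (concat : Bool) (fuel : Nat) (queue : List (Int × Int)) (results : List Int) : List Int :=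
  match fuel, queue with
  | _, [] => results
  | 0, _ :: _ => results  -- fuel exhausted: unreachable from check_equation's call
  | fuel + 1, curr :: rest =>
    if curr.2 = (numbers.length : Int) - 1 then
      checkLoop numbers concat fuel rest (results ++ [curr.1])
    else
      match PySem.List.pyGet? numbers (curr.2 + 1) with
      | none => checkLoop numbers concat fuel rest results
        -- Python raises IndexError here; unreachable when numbers ≠ []
      | some n =>
        -- Python pushes mul, then add, then (if concat) the int(str+str) value; head = top
        checkLoop numbers concat fuel
          ((if concat then
              match PySem.Int.ofStr? (PySem.Int.toStr curr.1 ++ PySem.Int.toStr n) with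
              | some c => [(c, curr.2 + 1)]
              | none => []  -- Python raises ValueError here (negative n); excluded by Pre_
            else []) ++ (curr.1 + n, curr.2 + 1) :: (curr.1 * n, curr.2 + 1) :: rest) results

def check_equation (result : Int) (numbers : List Int) (concat : Bool) : Bool :=
  match PySem.List.pyGet? numbers 0 with
  | none => false  -- Python raises IndexError on numbers[0]; excluded by Pre_
  | some n0 =>
    if (checkLoop numbers concat (4 ^ (numbers.length + 1)) [(n0, 0)] []).contains result then true
    else false

-- ===== PORT B =====
-- Source B's inner 'reach(acc, rest)': short-circuit disjunction over the three operators
def reachB (result : Int) (concat : Bool) (acc : Int) (rest : List Int) : Bool :=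
  match rest with
  | [] => acc == result
  | n :: tail =>
    reachB result concat (acc + n) tail
    || reachB result concat (acc * n) tail
    || (concat &&
        match PySem.Int.ofStr? (PySem.Int.toStr acc ++ PySem.Int.toStr n) with
        | some c => reachB result concat c tail
        | none => false)  -- Python raises ValueError here (negative n); excluded by Pre_

def check_equation_alt (result : Int) (numbers : List Int) (concat : Bool) : Bool :=
  match numbers with
  | [] => false  -- Python raises IndexError on numbers[0]; excluded by Pre_
  | n0 :: tail => reachB result concat n0 tail

-- ===== PRECONDITION & SPEC =====
-- Pre_ excludes exactly the inputs where Python A (and Python B) raise: an empty numbers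
-- list (IndexError on numbers[0]) and, with concat set, a negative number after the first
-- (int(str(a)+str(b)) sees '…-…' and raises ValueError).
def Pre_check_equation (result : Int) (numbers : List Int) (concat : Bool) : Prop :=
  numbers ≠ [] ∧ (concat = true → ∀ n ∈ numbers.tail, 0 ≤ n)
instance (result : Int) (numbers : List Int) (concat : Bool) : Decidable (Pre_check_equation result numbers concat) := by unfold Pre_check_equation; infer_instance
def pvWitness_check_equation : Int × List Int × Bool := (292, [11, 6, 16, 20], true)

def Spec_check_equation (result : Int) (numbers : List Int) (concat : Bool) (out : Bool) : Prop := out = check_equation_alt result numbers concat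
instance (result : Int) (numbers : List Int) (concat : Bool) (out : Bool) : Decidable (Spec_check_equation result numbers concat out) := by unfold Spec_check_equation; infer_instance

-- ===== CLAIM (what is proved, stated in full; the proofs are below) =====
def Claim_equal_check_equation : Prop := ∀ (result : Int) (numbers : List Int) (concat : Bool), Dom_check_equation result numbers concat → Pre_check_equation result numbers concat → Spec_check_equation result numbers concat (check_equation result numbers concat)

-- ===== LEMMAS AND PROOFS =====

-- weight of a queue entry: an upper bound on the loop steps its subtree still needs
def pvWeight (len : Nat) (i : Int) : Nat := 4 ^ ((len : Int) - i).toNat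

theorem pvDec_drop (len : Nat) (curr : Int × Int) (rest : List (Int × Int)) :
    ((rest.map (fun c => pvWeight len c.2)).sum)
      < (((curr :: rest).map (fun c => pvWeight len c.2)).sum) := by
  simp only [List.map_cons, List.sum_cons, pvWeight]
  have : 0 < 4 ^ ((len : Int) - curr.2).toNat := Nat.pow_pos (by norm_num)
  omega

theorem pvDec_push (numbers : List Int) (concat : Bool) (curr : Int × Int) (n : Int)
    (rest : List (Int × Int))
    (h : PySem.List.pyGet? numbers (curr.2 + 1) = some n) :
    ((((if concat then
          match PySem.Int.ofStr? (PySem.Int.toStr curr.1 ++ PySem.Int.toStr n) with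
          | some c => [(c, curr.2 + 1)]
          | none => []
        else []) ++ (curr.1 + n, curr.2 + 1) :: (curr.1 * n, curr.2 + 1) :: rest).map
        (fun c => pvWeight numbers.length c.2)).sum)
      < (((curr :: rest).map (fun c => pvWeight numbers.length c.2)).sum) := by
  have hrange : PySem.Raise.InRange numbers.length (curr.2 + 1) := by
    by_contra hc
    rw [← PySem.List.pyGet?_eq_none_iff] at hc
    rw [hc] at h
    simp at h
  have hle : 2 ≤ (numbers.length : Int) - curr.2 := by
    unfold PySem.Raise.InRange at hrange; omega
  have hexp : (((numbers.length : Int) - curr.2).toNat) = (((numbers.length : Int) - (curr.2 + 1)).toNat) + 1 := by omega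
  have hpow : 0 < 4 ^ (((numbers.length : Int) - (curr.2 + 1)).toNat) := Nat.pow_pos (by norm_num)
  simp only [List.map_append, List.map_cons, List.sum_append, List.sum_cons, pvWeight]
  rw [hexp, pow_succ]
  split
  · split <;>
      simp only [List.map_cons, List.map_nil, List.sum_cons, List.sum_nil] <;> omega
  · simp only [List.map_nil, List.sum_nil]; omega

-- the leaf values of the operator tree rooted at (v, rest), in A's pop order
def pvAll (concat : Bool) (v : Int) (rest : List Int) : List Int :=
  match rest with
  | [] => [v]
  | n :: tail =>
    (if concat then
       match PySem.Int.ofStr? (PySem.Int.toStr v ++ PySem.Int.toStr n) with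
       | some c => pvAll concat c tail
       | none => []
     else []) ++ pvAll concat (v + n) tail ++ pvAll concat (v * n) tail

theorem reachB_eq_mem (result : Int) (concat : Bool) (acc : Int) (rest : List Int) :
    reachB result concat acc rest = decide (result ∈ pvAll concat acc rest) := by
  induction rest generalizing acc with
  | nil =>
    simp only [reachB, pvAll, List.mem_singleton]
    by_cases h : acc = result
    · subst h; simp
    · simp [h, Ne.symm h]
  | cons n tail ih =>
    rw [reachB, pvAll]
    rcases hp : PySem.Int.ofStr? (PySem.Int.toStr acc ++ PySem.Int.toStr n) with - | c <;>
      cases concat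
    · simp [ih, List.mem_append, Bool.decide_or]
    · simp only [ih, Bool.true_and, if_pos, List.mem_append, Bool.decide_or,
        List.not_mem_nil, decide_false, Bool.or_false]
      cases decide (result ∈ pvAll true (acc + n) tail) <;>
        cases decide (result ∈ pvAll true (acc * n) tail) <;> simp
    · simp [ih, List.mem_append, Bool.decide_or]
    · simp only [ih, Bool.true_and, if_pos, List.mem_append, Bool.decide_or]
      cases decide (result ∈ pvAll true c tail) <;>
        cases decide (result ∈ pvAll true (acc + n) tail) <;>
        cases decide (result ∈ pvAll true (acc * n) tail) <;> simp

theorem checkLoop_spec (numbers : List Int) (concat : Bool)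
    (fuel : Nat) (queue : List (Int × Int)) (results : List Int)
    (hq : ∀ c ∈ queue, 0 ≤ c.2 ∧ c.2 ≤ (numbers.length : Int) - 1)
    (hfuel : (queue.map (fun c => pvWeight numbers.length c.2)).sum ≤ fuel) :
    checkLoop numbers concat fuel queue results
      = results ++ queue.flatMap (fun c => pvAll concat c.1 (numbers.drop (c.2 + 1).toNat)) := by
  induction fuel generalizing queue results with
  | zero =>
    cases queue with
    | nil => simp [checkLoop]
    | cons curr rest =>
      exfalso
      have hw : 0 < pvWeight numbers.length curr.2 := Nat.pow_pos (by norm_num)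
      simp only [List.map_cons, List.sum_cons] at hfuel
      omega
  | succ fuel ih =>
    cases queue with
    | nil => simp [checkLoop]
    | cons curr rest =>
      have hcur := hq curr (by simp)
      by_cases heq : curr.2 = (numbers.length : Int) - 1
      · rw [checkLoop, if_pos heq,
          ih rest (results ++ [curr.1]) (fun c hc => hq c (by simp [hc]))
            (by have := pvDec_drop numbers.length curr rest; omega)]
        have hdrop : numbers.drop (curr.2 + 1).toNat = [] := by
          apply List.drop_eq_nil_of_le; omega
        simp [hdrop, pvAll]
      · cases h : PySem.List.pyGet? numbers (curr.2 + 1) with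
        | none =>
          exfalso
          rw [PySem.List.pyGet?_eq_none_iff] at h
          exact h (by unfold PySem.Raise.InRange; omega)
        | some n =>
          have hlt : (curr.2 + 1).toNat < numbers.length := by
            by_contra hge
            have hnone : PySem.List.pyGet? numbers (curr.2 + 1) = none := by
              rw [PySem.List.pyGet?_eq_none_iff]; unfold PySem.Raise.InRange; omega
            simp [hnone] at h
          have hget : numbers[(curr.2 + 1).toNat] = n := by
            have h2 := PySem.List.pyGet?_eq_some_getElem (xs := numbers) (i := curr.2 + 1)
              (by omega) (by omega)
            exact (Option.some.inj (h2.symm.trans h))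
          rw [checkLoop, if_neg heq]
          simp only [h]
          have hq' : ∀ c ∈ ((if concat = true then
              match PySem.Int.ofStr? (PySem.Int.toStr curr.1 ++ PySem.Int.toStr n) with
              | some c => [(c, curr.2 + 1)]
              | none => []
            else []) ++ (curr.1 + n, curr.2 + 1) :: (curr.1 * n, curr.2 + 1) :: rest),
              0 ≤ c.2 ∧ c.2 ≤ (numbers.length : Int) - 1 := by
            intro c hc
            rcases List.mem_append.1 hc with hc | hc
            · have hc2 : c.2 = curr.2 + 1 := by
                split at hc
                · split at hc
                  · simp at hc; rw [hc]
                  · simp at hc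
                · simp at hc
              constructor <;> rw [hc2] <;> omega
            · simp only [List.mem_cons] at hc
              rcases hc with hc | hc | hc
              · rw [hc]; constructor <;> simp <;> omega
              · rw [hc]; constructor <;> simp <;> omega
              · exact hq c (by simp [hc])
          rw [ih _ results hq' (by have := pvDec_push numbers concat curr n rest h; omega)]
          have hdrop : numbers.drop (curr.2 + 1).toNat
              = n :: numbers.drop (curr.2 + 1 + 1).toNat := by
            have e : (curr.2 + 1 + 1).toNat = (curr.2 + 1).toNat + 1 := by omega
            rw [List.drop_eq_getElem_cons hlt, hget, e]
          simp only [List.flatMap_append, List.flatMap_cons, hdrop, pvAll]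
          split
          · split
            · simp [List.flatMap_cons, List.append_assoc]
            · simp [List.append_assoc]
          · simp [List.append_assoc]

-- ===== VERDICT (by name: the statement is the Claim_ definition above) =====
theorem check_equation_spec : Claim_equal_check_equation := by
  intro result numbers concat _hdom hpre
  unfold Spec_check_equation
  obtain ⟨hne, -⟩ := hpre
  cases numbers with
  | nil => exact absurd rfl hne
  | cons n0 tail =>
    have hq : ∀ c ∈ ([(n0, (0 : Int))] : List (Int × Int)),
        0 ≤ c.2 ∧ c.2 ≤ ((n0 :: tail).length : Int) - 1 := by
      intro c hc
      simp only [List.mem_singleton] at hc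
      subst hc
      refine ⟨le_refl 0, ?_⟩
      simp only [List.length_cons]
      push_cast
      omega
    have hfuel : (([(n0, (0 : Int))] : List (Int × Int)).map
        (fun c => pvWeight (n0 :: tail).length c.2)).sum ≤ 4 ^ ((n0 :: tail).length + 1) := by
      simp only [List.map_cons, List.map_nil, List.sum_cons, List.sum_nil, pvWeight]
      have e : (((n0 :: tail).length : Int) - 0).toNat = (n0 :: tail).length := by omega
      rw [e]
      exact Nat.le_of_lt (Nat.pow_lt_pow_right (by norm_num) (by omega))
    simp only [check_equation, check_equation_alt, PySem.List.pyGet?_zero_cons,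
      checkLoop_spec (n0 :: tail) concat _ _ _ hq hfuel, reachB_eq_mem]
    have h1 : ((0 : Int) + 1).toNat = 1 := by omega
    simp only [List.flatMap_cons, List.flatMap_nil, List.nil_append, List.append_nil, h1,
      List.drop_succ_cons, List.drop_zero, List.contains_eq_mem]
    cases hm : decide (result ∈ pvAll concat n0 tail) <;> simp_all
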